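-- pv_equiv track=rewrite | github.com/Dhruv11092003/skillExtract | src/pipeline/preprocess.py | create_dummy_bboxes
-- ===== SOURCE A (Python) =====
-- from typing import Dict, List
--
-- def create_dummy_bboxes(tokens: List[str], line_width: int = 1000, line_height: int = 40) -> List[List[int]]:
--     bboxes = []
--     cursor_x, cursor_y = 0, 0
--     for token in tokens:
--         token_w = min(180, 20 + 10 * len(token))
--         x0, y0 = cursor_x, cursor_y
--         x1, y1 = min(line_width, cursor_x + token_w), cursor_y + line_height
--         bboxes.append([x0, y0, x1, y1])
--         cursor_x += token_w + 10
--         if cursor_x > line_width - 200: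
--             cursor_x = 0
--             cursor_y += line_height + 10
--     return bboxes
-- ===== SOURCE B (Python) =====
-- def create_dummy_bboxes(tokens, line_width=1000, line_height=40):
--     # pass 1: break the token stream into lines (layout decision only)
--     lines = []
--     cur, cursor_x = [], 0
--     for token in tokens:
--         cur.append(token)
--         cursor_x += min(180, 20 + 10 * len(token)) + 10
--         if cursor_x > line_width - 200:
--             lines.append(cur)
--             cur, cursor_x = [], 0
--     if cur:
--         lines.append(cur)
--     # pass 2: emit coordinates per line from its line index
--     bboxes = []
--     for i, line in enumerate(lines):
--         cursor_y = i * (line_height + 10)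
--         cursor_x = 0
--         for token in line:
--             token_w = min(180, 20 + 10 * len(token))
--             bboxes.append([cursor_x, cursor_y,
--                            min(line_width, cursor_x + token_w),
--                            cursor_y + line_height])
--             cursor_x += token_w + 10
--     return bboxes
-- ===== Notes on version B (the rewrite author's own statement) =====
-- stated objective: alternative
-- what changed: B separates line-breaking from coordinate generation: a first pass groups tokens into lines, a second pass computes each line's y from its index and emits boxes, instead of A's single stateful loop interleaving both.
import Mathlib
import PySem

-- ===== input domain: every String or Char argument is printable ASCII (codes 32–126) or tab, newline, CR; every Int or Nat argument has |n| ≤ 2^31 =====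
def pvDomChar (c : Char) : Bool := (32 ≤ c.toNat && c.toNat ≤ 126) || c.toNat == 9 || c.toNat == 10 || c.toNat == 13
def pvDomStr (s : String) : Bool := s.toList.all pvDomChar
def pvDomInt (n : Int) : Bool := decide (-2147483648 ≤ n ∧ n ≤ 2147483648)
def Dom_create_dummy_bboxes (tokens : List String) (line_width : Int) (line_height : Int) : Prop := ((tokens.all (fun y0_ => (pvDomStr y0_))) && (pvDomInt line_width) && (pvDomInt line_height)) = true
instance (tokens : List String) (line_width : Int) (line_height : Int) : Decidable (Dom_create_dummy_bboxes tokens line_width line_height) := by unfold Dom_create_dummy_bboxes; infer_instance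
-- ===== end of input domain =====

-- B splits A's single stateful loop into a line-grouping pass followed by a per-line
-- coordinate-emission pass (y from the line index); same output, alternative decomposition.


-- ===== PORT A =====
def create_dummy_bboxes (tokens : List String) (line_width : Int) (line_height : Int) : List (List Int) :=
  (tokens.foldl
    (fun (st : List (List Int) × Int × Int) token =>
      let bboxes := st.1
      let cursor_x := st.2.1
      let cursor_y := st.2.2
      let token_w := min 180 (20 + 10 * PySem.Str.len token)
      let bboxes := bboxes ++ [[cursor_x, cursor_y, min line_width (cursor_x + token_w), cursor_y + line_height]]
      let cursor_x := cursor_x + token_w + 10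
      if cursor_x > line_width - 200 then (bboxes, 0, cursor_y + line_height + 10)
      else (bboxes, cursor_x, cursor_y))
    ([], 0, 0)).1

-- ===== PORT B =====
def create_dummy_bboxes_alt (tokens : List String) (line_width : Int) (line_height : Int) : List (List Int) :=
  -- pass 1: break the token stream into lines
  let st := tokens.foldl
    (fun (st : List (List String) × List String × Int) token =>
      let lines := st.1
      let cur := st.2.1 ++ [token]
      let cursor_x := st.2.2 + min 180 (20 + 10 * PySem.Str.len token) + 10
      if cursor_x > line_width - 200 then (lines ++ [cur], [], 0)
      else (lines, cur, cursor_x))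
    ([], [], 0)
  let lines := if st.2.1 = [] then st.1 else st.1 ++ [st.2.1]
  -- pass 2: emit coordinates per line from its line index
  (PySem.List.enumerate lines 0).foldl
    (fun (bboxes : List (List Int)) p =>
      let cursor_y := p.1 * (line_height + 10)
      (p.2.foldl
        (fun (st : List (List Int) × Int) token =>
          let token_w := min 180 (20 + 10 * PySem.Str.len token)
          (st.1 ++ [[st.2, cursor_y, min line_width (st.2 + token_w), cursor_y + line_height]],
           st.2 + token_w + 10))
        (bboxes, 0)).1)
    []

-- ===== PRECONDITION & SPEC =====
def Spec_create_dummy_bboxes (tokens : List String) (line_width : Int) (line_height : Int) (out : List (List Int)) : Prop := out = create_dummy_bboxes_alt tokens line_width line_height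
instance (tokens : List String) (line_width : Int) (line_height : Int) (out : List (List Int)) : Decidable (Spec_create_dummy_bboxes tokens line_width line_height out) := by unfold Spec_create_dummy_bboxes; infer_instance

-- ===== CLAIM (what is proved, stated in full; the proofs are below) =====
def Claim_equal_create_dummy_bboxes : Prop := ∀ (tokens : List String) (line_width : Int) (line_height : Int), Dom_create_dummy_bboxes tokens line_width line_height → Spec_create_dummy_bboxes tokens line_width line_height (create_dummy_bboxes tokens line_width line_height)

-- ===== LEMMAS AND PROOFS =====

/-- Width-plus-gap of a token. -/
def tokW (t : String) : Int := min 180 (20 + 10 * PySem.Str.len t)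

/-- Total advance of a list of tokens. -/
def widthOf : List String → Int
  | [] => 0
  | t :: ts => tokW t + 10 + widthOf ts

/-- A's loop, as structural recursion producing only the emitted boxes. -/
def loopA (lw lh : Int) : List String → Int → Int → List (List Int)
  | [], _, _ => []
  | t :: ts, cx, cy =>
    [cx, cy, min lw (cx + tokW t), cy + lh] ::
      (if cx + tokW t + 10 > lw - 200 then loopA lw lh ts 0 (cy + lh + 10)
       else loopA lw lh ts (cx + tokW t + 10) cy)

/-- B's grouping pass, as structural recursion. -/
def groupB (lw : Int) : List String → List String → Int → List (List String)
  | [], cur, _ => if cur = [] then [] else [cur]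
  | t :: ts, cur, cx =>
    if cx + tokW t + 10 > lw - 200 then (cur ++ [t]) :: groupB lw ts [] 0
    else groupB lw ts (cur ++ [t]) (cx + tokW t + 10)

/-- Boxes of one line at height `cy` starting at `cx`. -/
def emitLine (lw lh cy : Int) : List String → Int → List (List Int)
  | [], _ => []
  | t :: ts, cx => [cx, cy, min lw (cx + tokW t), cy + lh] :: emitLine lw lh cy ts (cx + tokW t + 10)

/-- Boxes of all lines starting at line index `k`. -/
def emitK (lw lh : Int) : Int → List (List String) → List (List Int)
  | _, [] => []
  | k, l :: ls => emitLine lw lh (k * (lh + 10)) l 0 ++ emitK lw lh (k + 1) ls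

theorem widthOf_snoc (l : List String) (t : String) :
    widthOf (l ++ [t]) = widthOf l + tokW t + 10 := by
  induction l with
  | nil => simp [widthOf]
  | cons a as ih => simp only [List.cons_append, widthOf, ih]; ring

theorem emitLine_append (lw lh cy : Int) (l1 l2 : List String) (cx : Int) :
    emitLine lw lh cy (l1 ++ l2) cx
      = emitLine lw lh cy l1 cx ++ emitLine lw lh cy l2 (cx + widthOf l1) := by
  induction l1 generalizing cx with
  | nil => simp [emitLine, widthOf]
  | cons t ts ih =>
    simp only [List.cons_append, emitLine, widthOf, ih, List.cons_inj_right]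
    ring_nf

/-- Master lemma: emitting B's grouping from line index `k` reproduces the partial line's
boxes followed by A's loop continued from cursor `widthOf cur`. -/
theorem emitK_groupB (lw lh : Int) (ts : List String) :
    ∀ (cur : List String) (k : Int),
      emitK lw lh k (groupB lw ts cur (widthOf cur))
        = emitLine lw lh (k * (lh + 10)) cur 0 ++ loopA lw lh ts (widthOf cur) (k * (lh + 10)) := by
  induction ts with
  | nil =>
    intro cur k
    by_cases h : cur = [] <;> simp [groupB, loopA, emitK, emitLine, h]
  | cons t ts ih =>
    intro cur k
    by_cases h : widthOf cur + tokW t + 10 > lw - 200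
    · simp only [groupB, loopA, if_pos h, emitK]
      have h0 : widthOf ([] : List String) = 0 := rfl
      have hrec := ih [] (k + 1)
      rw [h0] at hrec
      rw [hrec, emitLine_append]
      rw [show (k + 1) * (lh + 10) = k * (lh + 10) + lh + 10 by ring]
      simp [emitLine]
    · simp only [groupB, loopA, if_neg h]
      rw [← widthOf_snoc]
      rw [ih (cur ++ [t]) k, emitLine_append, widthOf_snoc]
      simp [emitLine, List.append_assoc]

/-- A's foldl equals the accumulated boxes plus `loopA`. -/
theorem foldA_eq_loopA (lw lh : Int) (ts : List String) :
    ∀ (st : List (List Int) × Int × Int),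
      (ts.foldl
        (fun (st : List (List Int) × Int × Int) token =>
          let bboxes := st.1
          let cursor_x := st.2.1
          let cursor_y := st.2.2
          let token_w := min 180 (20 + 10 * PySem.Str.len token)
          let bboxes := bboxes ++ [[cursor_x, cursor_y, min lw (cursor_x + token_w), cursor_y + lh]]
          let cursor_x := cursor_x + token_w + 10
          if cursor_x > lw - 200 then (bboxes, 0, cursor_y + lh + 10)
          else (bboxes, cursor_x, cursor_y))
        st).1 = st.1 ++ loopA lw lh ts st.2.1 st.2.2 := by
  induction ts with
  | nil => intro st; simp [loopA]
  | cons t ts ih =>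
    intro st
    simp only [List.foldl_cons, ih]
    by_cases h : lw - 200 < st.2.1 + min 180 (20 + 10 * (t.length : Int)) + 10 <;>
      simp [loopA, tokW, h]

/-- B's pass-1 foldl plus the final flush equals `groupB`. -/
theorem foldB1_eq_groupB (lw : Int) (ts : List String) :
    ∀ (st : List (List String) × List String × Int),
      (if (ts.foldl
            (fun (st : List (List String) × List String × Int) token =>
              let lines := st.1
              let cur := st.2.1 ++ [token]
              let cursor_x := st.2.2 + min 180 (20 + 10 * PySem.Str.len token) + 10
              if cursor_x > lw - 200 then (lines ++ [cur], [], 0)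
              else (lines, cur, cursor_x))
            st).2.1 = []
       then (ts.foldl
            (fun (st : List (List String) × List String × Int) token =>
              let lines := st.1
              let cur := st.2.1 ++ [token]
              let cursor_x := st.2.2 + min 180 (20 + 10 * PySem.Str.len token) + 10
              if cursor_x > lw - 200 then (lines ++ [cur], [], 0)
              else (lines, cur, cursor_x))
            st).1
       else (ts.foldl
            (fun (st : List (List String) × List String × Int) token =>
              let lines := st.1
              let cur := st.2.1 ++ [token]
              let cursor_x := st.2.2 + min 180 (20 + 10 * PySem.Str.len token) + 10
              if cursor_x > lw - 200 then (lines ++ [cur], [], 0)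
              else (lines, cur, cursor_x))
            st).1 ++ [(ts.foldl
            (fun (st : List (List String) × List String × Int) token =>
              let lines := st.1
              let cur := st.2.1 ++ [token]
              let cursor_x := st.2.2 + min 180 (20 + 10 * PySem.Str.len token) + 10
              if cursor_x > lw - 200 then (lines ++ [cur], [], 0)
              else (lines, cur, cursor_x))
            st).2.1])
      = st.1 ++ groupB lw ts st.2.1 st.2.2 := by
  induction ts with
  | nil =>
    intro st
    by_cases h : st.2.1 = [] <;> simp [groupB, h]
  | cons t ts ih =>
    intro st
    simp only [List.foldl_cons, ih]
    by_cases h : lw - 200 < st.2.2 + min 180 (20 + 10 * (t.length : Int)) + 10 <;>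
      simp [groupB, tokW, h]

/-- B's inner foldl over one line equals the accumulated boxes plus `emitLine`. -/
theorem foldB2_inner (lw lh cy : Int) (l : List String) :
    ∀ (st : List (List Int) × Int),
      (l.foldl
        (fun (st : List (List Int) × Int) token =>
          let token_w := min 180 (20 + 10 * PySem.Str.len token)
          (st.1 ++ [[st.2, cy, min lw (st.2 + token_w), cy + lh]], st.2 + token_w + 10))
        st).1 = st.1 ++ emitLine lw lh cy l st.2 := by
  induction l with
  | nil => intro st; simp [emitLine]
  | cons t ts ih =>
    intro st
    simp only [List.foldl_cons, ih]
    simp [emitLine, tokW]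

/-- B's pass-2 foldl over the enumerated lines equals the accumulated boxes plus `emitK`. -/
theorem foldB2_eq_emitK (lw lh : Int) (lines : List (List String)) :
    ∀ (k : Int) (acc : List (List Int)),
      ((PySem.List.enumerate lines k).foldl
        (fun (bboxes : List (List Int)) p =>
          let cursor_y := p.1 * (lh + 10)
          (p.2.foldl
            (fun (st : List (List Int) × Int) token =>
              let token_w := min 180 (20 + 10 * PySem.Str.len token)
              (st.1 ++ [[st.2, cursor_y, min lw (st.2 + token_w), cursor_y + lh]],
               st.2 + token_w + 10))
            (bboxes, 0)).1)
        acc) = acc ++ emitK lw lh k lines := by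
  induction lines with
  | nil => intro k acc; simp [PySem.List.enumerate_nil, emitK]
  | cons l ls ih =>
    intro k acc
    rw [PySem.List.enumerate_cons]
    simp only [List.foldl_cons, ih]
    have hin := foldB2_inner lw lh (k * (lh + 10)) l ((acc, 0) : List (List Int) × Int)
    simp at hin
    simp [hin, emitK]

-- ===== VERDICT (by name: the statement is the Claim_ definition above) =====
theorem create_dummy_bboxes_spec : Claim_equal_create_dummy_bboxes := by
  intro tokens lw lh _
  unfold Spec_create_dummy_bboxes create_dummy_bboxes create_dummy_bboxes_alt
  rw [foldA_eq_loopA lw lh tokens ([], 0, 0)]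
  simp only []
  rw [foldB1_eq_groupB lw tokens ([], [], 0)]
  rw [foldB2_eq_emitK lw lh]
  have h0 : widthOf ([] : List String) = 0 := rfl
  have hm := emitK_groupB lw lh tokens [] 0
  rw [h0] at hm
  have hm2 : emitK lw lh 0 (groupB lw tokens [] 0) = loopA lw lh tokens 0 0 := by
    simpa [emitLine] using hm
  simp [hm2]
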